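-- pv_equiv track=rewrite | github.com/csmatyi/covid_wgks_analysis | scripts/kmer_analysis_km.py | mm_motif_list
-- ===== SOURCE A (Python) =====
-- from itertools import combinations
--
-- def mm_motif_list(motif, m):
--     ms = list()
--     ms.append(motif)
--     for mm in range(1, m + 1):
--         c = combinations(range(len(motif)),mm)
--         for jj in c:
--             mot = motif
--             for kk in jj:
--                 mot = mot[:kk]+'N'+mot[kk+1:]
--                 ms.append(mot)
--     return list(set(ms))
-- ===== SOURCE B (Python) =====
-- def mm_motif_list(motif, m):
--     # Breadth-first by substitution count: each level extends the previous
--     # level's motifs by one 'N' substitution at a position after the last one,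
--     # so no combination is ever enumerated or rebuilt from scratch.
--     n = len(motif)
--     out = [motif]
--     level = [(motif, 0)]
--     k = 0
--     while k < m and level:
--         nxt = []
--         for s, start in level:
--             for i in range(start, n):
--                 nxt.append((s[:i] + 'N' + s[i + 1:], i + 1))
--         out.extend(s for s, _ in nxt)
--         level = nxt
--         k += 1
--     return list(set(out))
-- ===== Notes on version B (the rewrite author's own statement) =====
-- stated objective: alternative
-- what changed: Replaces the per-size itertools.combinations enumeration (which rebuilds each motif by a chain of slice substitutions and re-appends every intermediate) with a breadth-first while loop that keeps the current level of (motif, next-position) pairs and extends each by a single 'N' substitution, stopping early when the level empties or the budget m is reached.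
import Mathlib
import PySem

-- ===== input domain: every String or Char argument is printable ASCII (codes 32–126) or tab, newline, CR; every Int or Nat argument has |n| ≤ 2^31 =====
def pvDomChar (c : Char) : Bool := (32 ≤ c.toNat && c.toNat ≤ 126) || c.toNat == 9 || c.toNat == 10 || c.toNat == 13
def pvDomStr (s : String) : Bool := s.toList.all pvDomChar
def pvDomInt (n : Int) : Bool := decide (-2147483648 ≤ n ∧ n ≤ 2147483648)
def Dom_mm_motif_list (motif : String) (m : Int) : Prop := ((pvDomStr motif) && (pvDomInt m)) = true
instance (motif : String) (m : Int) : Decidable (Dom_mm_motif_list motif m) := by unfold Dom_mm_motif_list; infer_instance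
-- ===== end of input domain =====

-- B replaces the combinations enumeration (which rebuilds every motif by a chain of
-- substitutions) with a breadth-first loop extending each previous-level motif by one
-- 'N' substitution; return value only (A mutates nothing observable).

-- ===== PORT A =====
-- A-side helper: mot[:kk] + 'N' + mot[kk+1:]  (PySem slices; '+' on str is concatenation)
def pvSubA (mot : String) (kk : Int) : String :=
  PySem.Str.slice mot none (some kk) ++ "N" ++ PySem.Str.slice mot (some (kk + 1)) none

def mm_motif_list (motif : String) (m : Int) : List String :=
  let ms : List String := [motif]      -- ms = list(); ms.append(motif)
  let ms := (PySem.List.pyRange 1 (m + 1)).foldl (fun ms mm =>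
    -- c = combinations(range(len(motif)), mm): PySem.List.combinations, CPython's order
    let c := PySem.List.combinations (PySem.List.pyRange 0 (PySem.Str.len motif)) mm.toNat
    c.foldl (fun ms jj =>
      (jj.foldl (fun (st : String × List String) kk =>
        let mot := pvSubA st.1 kk
        (mot, st.2 ++ [mot])) (motif, ms)).2) ms) ms
  PySem.Set.ofList ms                  -- list(set(ms)): the distinct elements

-- ===== PORT B =====
-- B-side helper: s[:i] + 'N' + s[i+1:]
def pvSubB (s : String) (i : Int) : String :=
  PySem.Str.slice s none (some i) ++ "N" ++ PySem.Str.slice s (some (i + 1)) none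

-- the 'while k < m and level:' loop of Source B; terminates because k climbs towards m
def pvAltLoop (n m : Int) (k : Int) (out : List String) (level : List (String × Int)) :
    List String :=
  if _h : k < m ∧ level ≠ [] then
    let nxt := level.flatMap (fun p =>
      (PySem.List.pyRange p.2 n).map (fun i => (pvSubB p.1 i, i + 1)))
    pvAltLoop n m (k + 1) (out ++ nxt.map Prod.fst) nxt
  else out
termination_by (m - k).toNat
decreasing_by omega

def mm_motif_list_alt (motif : String) (m : Int) : List String :=
  PySem.Set.ofList
    (pvAltLoop (PySem.Str.len motif) m 0 [motif] [(motif, 0)])   -- list(set(out))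

-- ===== PRECONDITION & SPEC =====
def Spec_mm_motif_list (motif : String) (m : Int) (out : List String) : Prop := out = mm_motif_list_alt motif m
instance (motif : String) (m : Int) (out : List String) : Decidable (Spec_mm_motif_list motif m out) := by unfold Spec_mm_motif_list; infer_instance

-- ===== CLAIM (what is proved, stated in full; the proofs are below) =====
def Claim_equal_mm_motif_list : Prop := ∀ (motif : String) (m : Int), Dom_mm_motif_list motif m → Spec_mm_motif_list motif m (mm_motif_list motif m)

-- ===== LEMMAS AND PROOFS =====

-- proof-side vocabulary
def pvApply (s : String) (jj : List Int) : String := jj.foldl pvSubA s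
def pvChain (s : String) : List Int → List String
  | [] => []
  | kk :: t => pvSubA s kk :: pvChain (pvSubA s kk) t
def pvStart (jj : List Int) : Int := ((jj.getLast?).map (· + 1)).getD 0
def pvGt (jj : List Int) (i : Int) : Bool :=
  match jj.getLast? with | none => true | some l => decide (l < i)
def pvCombos (n : Int) (k : Nat) : List (List Int) :=
  PySem.List.combinations (PySem.List.pyRange 0 n) k
def pvLevels (motif : String) (n : Int) (k : Nat) : List String :=
  (pvCombos n k).map (pvApply motif)
def pvOut (motif : String) (n : Int) (K : Nat) : List String :=
  motif :: (List.range K).flatMap (fun t => pvLevels motif n (t + 1))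
def pvState (motif : String) (n : Int) (k : Nat) : List (String × Int) :=
  (pvCombos n k).map (fun jj => (pvApply motif jj, pvStart jj))

theorem pvSubB_eq : pvSubB = pvSubA := rfl

theorem pvApply_concat (s : String) (jj : List Int) (i : Int) :
    pvApply s (jj ++ [i]) = pvSubA (pvApply s jj) i := by
  simp [pvApply]

theorem pvChain_spec (jj : List Int) : ∀ (s : String) (acc : List String),
    jj.foldl (fun (st : String × List String) kk =>
      (pvSubA st.1 kk, st.2 ++ [pvSubA st.1 kk])) (s, acc) = (pvApply s jj, acc ++ pvChain s jj) := by
  induction jj with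
  | nil => intro s acc; simp [pvApply, pvChain]
  | cons k t ih => intro s acc; simp [List.foldl_cons, ih, pvApply, pvChain]

theorem pvChain_eq_map (jj : List Int) : ∀ (s : String),
    pvChain s jj = (List.range jj.length).map (fun t => pvApply s (jj.take (t + 1))) := by
  induction jj with
  | nil => intro s; simp [pvChain]
  | cons k t ih =>
    intro s
    simp only [pvChain, List.length_cons, List.range_succ_eq_map, List.map_cons, List.map_map]
    rw [List.cons_eq_cons]
    refine ⟨by simp [pvApply], ?_⟩
    rw [ih (pvSubA s k)]
    apply List.map_congr_left
    intro x _
    simp [pvApply, List.take_succ_cons, Function.comp, Nat.succ_eq_add_one]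

theorem pv_length_mem (n : Int) (k : Nat) (jj : List Int) (h : jj ∈ pvCombos n k) :
    jj.length = k :=
  ((PySem.List.mem_combinations_iff _ _ _).1 h).2

theorem pv_take_mem (n : Int) (k t : Nat) (jj : List Int) (h : jj ∈ pvCombos n k)
    (ht : t ≤ k) : jj.take t ∈ pvCombos n t := by
  rw [pvCombos, PySem.List.mem_combinations_iff] at h ⊢
  obtain ⟨hs, hl⟩ := h
  exact ⟨(List.take_sublist _ _).trans hs, by simp [List.length_take, hl, ht]⟩

theorem pv_mem_nonneg (n : Int) (k : Nat) (jj : List Int) (h : jj ∈ pvCombos n k) :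
    ∀ i ∈ jj, 0 ≤ i := by
  rw [pvCombos, PySem.List.mem_combinations_iff] at h
  intro i hi
  have := h.1.subset hi
  rw [PySem.List.mem_pyRange_one] at this
  exact this.1

theorem pvGt_last {jj : List Int} {l : Int} (h : jj.getLast? = some l) (i : Int) :
    pvGt jj i = decide (l < i) := by simp [pvGt, h]

theorem pvFlatMap_congr {α β : Type} {l : List α} {f g : α → List β}
    (h : ∀ a ∈ l, f a = g a) : l.flatMap f = l.flatMap g := by
  induction l with
  | nil => rfl
  | cons a t ih =>
    simp only [List.flatMap_cons, h a (List.mem_cons_self),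
      ih (fun b hb => h b (List.mem_cons_of_mem a hb))]

-- the heart: CPython's lex-order combinations of size k+1 are the size-k ones, each
-- extended by every later element
theorem pvCombext : ∀ (xs : List Int), xs.Pairwise (· < ·) → ∀ (k : Nat),
    PySem.List.combinations xs (k + 1) =
      (PySem.List.combinations xs k).flatMap
        (fun jj => (xs.filter (pvGt jj)).map (fun i => jj ++ [i])) := by
  intro xs
  induction xs with
  | nil =>
    intro _ k
    cases k <;>
      simp [PySem.List.combinations_zero, PySem.List.combinations_nil_succ]
  | cons x t ih =>
    intro hp k
    have hx : ∀ y ∈ t, x < y := fun y hy => (List.pairwise_cons.1 hp).1 y hy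
    have ht : t.Pairwise (· < ·) := (List.pairwise_cons.1 hp).2
    have hgt_x : ∀ (jj : List Int), jj.Sublist t → jj ≠ [] → pvGt jj x = false := by
      intro jj hsub hne
      rcases h : jj.getLast? with _ | l
      · exact absurd (List.getLast?_eq_none_iff.1 h) hne
      · have hl : l ∈ jj := List.mem_of_getLast? h
        simp [pvGt_last h]
        exact le_of_lt (hx l (hsub.subset hl))
    have hgt_consx : ∀ (jj : List Int), jj.Sublist t →
        ((x :: t).filter (pvGt (x :: jj)) = t.filter (pvGt jj)) := by
      intro jj hsub
      rw [List.filter_cons]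
      have hx0 : pvGt (x :: jj) x = false := by
        rcases h : jj.getLast? with _ | l
        · have : jj = [] := List.getLast?_eq_none_iff.1 h
          subst this; simp [pvGt]
        · have h2 : (x :: jj).getLast? = some l := by
            rw [List.getLast?_cons, h]; rfl
          have hl : l ∈ jj := List.mem_of_getLast? h
          simp [pvGt_last h2]
          exact le_of_lt (hx l (hsub.subset hl))
      rw [hx0]
      simp only [Bool.false_eq_true, if_false]
      apply List.filter_congr
      intro y hy
      rcases h : jj.getLast? with _ | l
      · have : jj = [] := List.getLast?_eq_none_iff.1 h
        subst this
        simp [pvGt, List.getLast?_cons]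
        exact hx y hy
      · have h2 : (x :: jj).getLast? = some l := by
          rw [List.getLast?_cons, h]; rfl
        rw [pvGt_last h2, pvGt_last h]
    cases k with
    | zero =>
      rw [PySem.List.combinations_zero, PySem.List.combinations_one]
      simp only [List.flatMap_cons, List.flatMap_nil, List.append_nil, List.nil_append]
      rw [show (x :: t).filter (pvGt []) = x :: t from
        List.filter_eq_self.2 (fun a _ => rfl)]
    | succ j =>
      rw [PySem.List.combinations_cons_succ, PySem.List.combinations_cons_succ,
        List.flatMap_append, List.flatMap_map]
      congr 1
      · rw [ih ht j, List.map_flatMap]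
        apply pvFlatMap_congr
        intro jj hjj
        have hsub := ((PySem.List.mem_combinations_iff _ _ _).1 hjj).1
        rw [hgt_consx jj hsub, List.map_map]
        rfl
      · rw [ih ht (j + 1)]
        apply pvFlatMap_congr
        intro jj hjj
        obtain ⟨hsub, hlen⟩ := (PySem.List.mem_combinations_iff _ _ _).1 hjj
        have hne : jj ≠ [] := by intro h; rw [h] at hlen; simp at hlen
        rw [List.filter_cons, hgt_x jj hsub hne]
        simp


theorem pvCombos_succ (n : Int) (k : Nat) :
    pvCombos n (k + 1) =
      (pvCombos n k).flatMap
        (fun jj => ((PySem.List.pyRange 0 n).filter (pvGt jj)).map (fun i => jj ++ [i])) :=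
  pvCombext _ (PySem.List.pairwise_lt_pyRange_one 0 n) k

theorem pvCombos_nil_mono (n : Int) (k : Nat) (h : pvCombos n k = []) :
    ∀ j, pvCombos n (k + j) = [] := by
  intro j
  induction j with
  | zero => exact h
  | succ j ihj =>
    rw [show k + (j + 1) = (k + j) + 1 by ring, pvCombos_succ, ihj, List.flatMap_nil]

theorem pv_filter_pyRange (l b : Int) (hl : -1 ≤ l) :
    (PySem.List.pyRange 0 b).filter (fun i => decide (l < i)) = PySem.List.pyRange (l + 1) b := by
  by_cases hb : b ≤ l + 1
  · rw [PySem.List.pyRange_one_eq_nil hb, List.filter_eq_nil_iff.2]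
    intro a ha
    rw [PySem.List.mem_pyRange_one] at ha
    simp only [decide_eq_true_eq]
    omega
  · have h1 : (PySem.List.pyRange 0 (l + 1)).filter (fun i => decide (l < i)) = [] := by
      apply List.filter_eq_nil_iff.2
      intro a ha
      rw [PySem.List.mem_pyRange_one] at ha
      simp only [decide_eq_true_eq]
      omega
    have h2 : (PySem.List.pyRange (l + 1) b).filter (fun i => decide (l < i)) =
        PySem.List.pyRange (l + 1) b := by
      apply List.filter_eq_self.2
      intro a ha
      rw [PySem.List.mem_pyRange_one] at ha
      simp only [decide_eq_true_eq]
      omega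
    rw [PySem.List.pyRange_one_append 0 (l + 1) b (by omega) (by omega), List.filter_append,
      h1, h2, List.nil_append]

theorem pv_filter_gt (jj : List Int) (b : Int) (hj : ∀ i ∈ jj, 0 ≤ i) :
    (PySem.List.pyRange 0 b).filter (pvGt jj) = PySem.List.pyRange (pvStart jj) b := by
  rcases h : jj.getLast? with _ | l
  · have : jj = [] := List.getLast?_eq_none_iff.1 h
    subst this
    rw [show List.filter (pvGt []) (PySem.List.pyRange 0 b) = PySem.List.pyRange 0 b from
      List.filter_eq_self.2 (fun a _ => rfl)]
    rfl
  · have h0 : (0 : Int) ≤ l := hj l (List.mem_of_getLast? h)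
    have hfun : pvGt jj = fun i => decide (l < i) := funext (pvGt_last h)
    rw [hfun, pv_filter_pyRange l b (by omega)]
    simp [pvStart, h]

-- Set helpers
theorem pvAdd_of_mem {s : PySem.Set String} {x : String} (h : x ∈ s) :
    PySem.Set.add s x = s := by
  simp [PySem.Set.add, PySem.Set.contains, h]

theorem pvUpdate_cons (s : PySem.Set String) (a : String) (l : List String) :
    PySem.Set.update s (a :: l) = PySem.Set.update (PySem.Set.add s a) l := rfl

theorem pvMem_add {s : PySem.Set String} {x y : String} (h : x ∈ s) : x ∈ PySem.Set.add s y := by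
  simp [PySem.Set.mem_add, h]

theorem pvUpdate_of_forall_mem {l : List String} : ∀ {s : PySem.Set String},
    (∀ x ∈ l, x ∈ s) → PySem.Set.update s l = s := by
  induction l with
  | nil => intro s _; rfl
  | cons a t ih =>
    intro s h
    rw [pvUpdate_cons, pvAdd_of_mem (h a List.mem_cons_self)]
    exact ih (fun x hx => h x (List.mem_cons_of_mem a hx))

theorem pvOfList_append (xs ys : List String) :
    PySem.Set.ofList (xs ++ ys) = PySem.Set.update (PySem.Set.ofList xs) ys := by
  rw [PySem.Set.ofList_eq_foldl, PySem.Set.ofList_eq_foldl, List.foldl_append]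
  rfl

theorem pvUpdate_append (s : PySem.Set String) (xs ys : List String) :
    PySem.Set.update s (xs ++ ys) = PySem.Set.update (PySem.Set.update s xs) ys := by
  simp [PySem.Set.update, List.foldl_append]

-- absorption: updating with the full chains is updating with their final motifs, once
-- every proper-prefix motif is already present
theorem pvUpdate_chain (motif : String) : ∀ (L : List (List Int)) (S : PySem.Set String),
    (∀ jj ∈ L, jj ≠ []) →
    (∀ jj ∈ L, ∀ t : Nat, t + 1 < jj.length → pvApply motif (jj.take (t + 1)) ∈ S) →
    PySem.Set.update S (L.flatMap (pvChain motif)) =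
      PySem.Set.update S (L.map (pvApply motif)) := by
  intro L
  induction L with
  | nil => intro S _ _; rfl
  | cons jj L ih =>
    intro S h1 h2
    have hne : jj ≠ [] := h1 jj List.mem_cons_self
    obtain ⟨p, hlen⟩ : ∃ p, jj.length = p + 1 := by
      cases jj with
      | nil => exact absurd rfl hne
      | cons a t => exact ⟨t.length, rfl⟩
    have hchain : PySem.Set.update S (pvChain motif jj) =
        PySem.Set.add S (pvApply motif jj) := by
      rw [pvChain_eq_map, hlen, List.range_succ, List.map_append, pvUpdate_append]
      have hfront : PySem.Set.update S
          ((List.range p).map (fun t => pvApply motif (jj.take (t + 1)))) = S := by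
        apply pvUpdate_of_forall_mem
        intro x hx
        simp only [List.mem_map, List.mem_range] at hx
        obtain ⟨t, hlt, rfl⟩ := hx
        exact h2 jj List.mem_cons_self t (by omega)
      rw [hfront]
      have htake : jj.take (p + 1) = jj := List.take_of_length_le (by omega)
      simp [PySem.Set.update, htake]
    rw [List.flatMap_cons, List.map_cons, pvUpdate_append, pvUpdate_cons, hchain]
    exact ih (PySem.Set.add S (pvApply motif jj))
      (fun x hx => h1 x (List.mem_cons_of_mem jj hx))
      (fun x hx t hlt => pvMem_add (h2 x (List.mem_cons_of_mem jj hx) t hlt))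

-- B-side loop characterisation
theorem pvState_step (motif : String) (n : Int) (κ : Nat) :
    (pvState motif n κ).flatMap (fun p =>
        (PySem.List.pyRange p.2 n).map (fun i => (pvSubB p.1 i, i + 1))) =
      pvState motif n (κ + 1) := by
  unfold pvState
  rw [List.flatMap_map, pvCombos_succ, List.map_flatMap]
  apply pvFlatMap_congr
  intro jj hjj
  rw [pv_filter_gt jj n (pv_mem_nonneg n κ jj hjj), List.map_map]
  apply List.map_congr_left
  intro i _
  have hst : pvStart (jj ++ [i]) = i + 1 := by simp [pvStart]
  simp [pvSubB_eq, pvApply_concat, hst]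

theorem pvState_fst (motif : String) (n : Int) (k : Nat) :
    (pvState motif n k).map Prod.fst = pvLevels motif n k := by
  simp [pvState, pvLevels, List.map_map]

theorem pvOut_succ (motif : String) (n : Int) (k : Nat) :
    pvOut motif n k ++ pvLevels motif n (k + 1) = pvOut motif n (k + 1) := by
  unfold pvOut
  rw [List.range_succ, List.flatMap_append]
  simp

theorem pvFlatMap_range_stall {β : Type} (f : Nat → List β) (κ : Nat)
    (hf : ∀ t, κ ≤ t → f t = []) : ∀ M, κ ≤ M →
    (List.range M).flatMap f = (List.range κ).flatMap f := by
  intro M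
  induction M with
  | zero => intro h0; rw [Nat.le_zero.1 h0]
  | succ M ih =>
    intro h
    by_cases hc : κ ≤ M
    · rw [List.range_succ, List.flatMap_append, ih hc]
      simp [hf M (by omega)]
    · rw [show κ = M + 1 by omega]

theorem pvOut_stall (motif : String) (n : Int) (κ M : Nat) (hκM : κ ≤ M)
    (h : pvCombos n κ = []) : pvOut motif n M = pvOut motif n κ := by
  unfold pvOut
  rw [pvFlatMap_range_stall _ κ ?_ M hκM]
  intro t hκt
  have : pvCombos n (κ + (t + 1 - κ)) = [] := pvCombos_nil_mono n κ h _
  rw [show κ + (t + 1 - κ) = t + 1 by omega] at this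
  simp [pvLevels, this]

theorem pvAltLoop_eq (motif : String) (n m : Int) : ∀ (d κ : Nat), m.toNat - κ = d → κ ≤ m.toNat →
    pvAltLoop n m (κ : Int) (pvOut motif n κ) (pvState motif n κ) = pvOut motif n m.toNat := by
  intro d
  induction d with
  | zero =>
    intro κ hd hκ
    have hκM : κ = m.toNat := by omega
    rw [pvAltLoop, dif_neg]
    · rw [hκM]
    · rintro ⟨h1, _⟩
      omega
  | succ d ihd =>
    intro κ hd hκ
    rw [pvAltLoop]
    by_cases hg : (κ : Int) < m ∧ pvState motif n κ ≠ []
    · rw [dif_pos hg]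
      simp only [pvState_step, pvState_fst]
      rw [pvOut_succ]
      have hcast : (κ : Int) + 1 = ((κ + 1 : Nat) : Int) := by push_cast; ring
      rw [hcast]
      exact ihd (κ + 1) (by omega) (by omega)
    · rw [dif_neg hg]
      have hm : (κ : Int) < m := by omega
      have hstate : pvState motif n κ = [] := by tauto
      have hcombos : pvCombos n κ = [] := by
        simpa [pvState] using hstate
      rw [pvOut_stall motif n κ m.toNat hκ hcombos]

theorem pvB_shape (motif : String) (m : Int) :
    mm_motif_list_alt motif m =
      PySem.Set.ofList (pvOut motif (PySem.Str.len motif) m.toNat) := by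
  unfold mm_motif_list_alt
  have h0 : [motif] = pvOut motif (PySem.Str.len motif) 0 := by simp [pvOut]
  have h1 : [(motif, (0 : Int))] = pvState motif (PySem.Str.len motif) 0 := by
    simp [pvState, pvCombos, PySem.List.combinations_zero]
    exact ⟨rfl, rfl⟩
  rw [h0, h1, show (0 : Int) = ((0 : Nat) : Int) from rfl,
    pvAltLoop_eq motif (PySem.Str.len motif) m (m.toNat) 0 (by omega) (by omega)]

theorem pvA_shape (motif : String) (m : Int) :
    mm_motif_list motif m =
      PySem.Set.ofList (motif :: (List.range m.toNat).flatMap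
        (fun t => (pvCombos (PySem.Str.len motif) (t + 1)).flatMap (pvChain motif))) := by
  unfold mm_motif_list
  simp only []
  have hinner : ∀ (ms : List String) (c : List (List Int)),
      c.foldl (fun ms jj => (jj.foldl (fun (st : String × List String) kk =>
        (pvSubA st.1 kk, st.2 ++ [pvSubA st.1 kk])) (motif, ms)).2) ms =
      ms ++ c.flatMap (pvChain motif) := by
    intro ms c
    rw [PySem.List.foldl_congr_mem c _ (fun ms jj => ms ++ pvChain motif jj) ms
      (fun acc jj _ => by rw [pvChain_spec])]
    exact PySem.List.foldl_append_eq_flatMap _ c ms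
  have houter : (PySem.List.pyRange 1 (m + 1)).foldl
      (fun ms mm => (PySem.List.combinations
          (PySem.List.pyRange 0 (PySem.Str.len motif)) mm.toNat).foldl
        (fun ms jj => (jj.foldl (fun (st : String × List String) kk =>
          (pvSubA st.1 kk, st.2 ++ [pvSubA st.1 kk])) (motif, ms)).2) ms) [motif] =
      (PySem.List.pyRange 1 (m + 1)).foldl
        (fun ms mm => ms ++ (PySem.List.combinations
          (PySem.List.pyRange 0 (PySem.Str.len motif)) mm.toNat).flatMap (pvChain motif))
        [motif] := by
    apply PySem.List.foldl_congr_mem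
    intro acc mm _
    exact hinner acc _
  rw [houter, PySem.List.foldl_append_eq_flatMap,
    show PySem.List.pyRange 1 (m + 1) =
        (List.range m.toNat).map (fun (k : Nat) => 1 + (k : Int)) from by
      rw [PySem.List.pyRange_one, show (m + 1 - 1).toNat = m.toNat by omega],
    List.singleton_append, List.flatMap_map]
  simp only [pvCombos]
  congr 1
  congr 1
  apply pvFlatMap_congr
  intro t _
  rw [show (1 + (t : Int)).toNat = t + 1 by omega]

theorem pvAB_sets (motif : String) (n : Int) : ∀ (M : Nat),
    PySem.Set.ofList (motif :: (List.range M).flatMap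
        (fun t => (pvCombos n (t + 1)).flatMap (pvChain motif))) =
      PySem.Set.ofList (pvOut motif n M) := by
  intro M
  induction M with
  | zero => rfl
  | succ M ih =>
    rw [List.range_succ, List.flatMap_append, ← List.cons_append, pvOfList_append, ih,
      List.flatMap_cons, List.flatMap_nil, List.append_nil]
    rw [pvUpdate_chain motif (pvCombos n (M + 1)) _ ?hne ?hmem]
    · rw [show List.map (pvApply motif) (pvCombos n (M + 1)) = pvLevels motif n (M + 1) from rfl,
        ← pvOfList_append, pvOut_succ]
    case hne =>
      intro jj hjj
      have := pv_length_mem n (M + 1) jj hjj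
      intro hcon
      rw [hcon] at this
      simp at this
    case hmem =>
      intro jj hjj t hlt
      rw [PySem.Set.mem_ofList]
      have hlen := pv_length_mem n (M + 1) jj hjj
      have htm : jj.take (t + 1) ∈ pvCombos n (t + 1) :=
        pv_take_mem n (M + 1) (t + 1) jj hjj (by omega)
      unfold pvOut
      apply List.mem_cons_of_mem
      rw [List.mem_flatMap]
      exact ⟨t, by simp only [List.mem_range]; omega,
        by simp only [pvLevels, List.mem_map]; exact ⟨jj.take (t + 1), htm, rfl⟩⟩

-- ===== VERDICT (by name: the statement is the Claim_ definition above) =====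
theorem mm_motif_list_spec : Claim_equal_mm_motif_list := by
  intro motif m _
  unfold Spec_mm_motif_list
  rw [pvA_shape, pvB_shape, pvAB_sets]
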